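-- pv_equiv track=rewrite | github.com/BrianDead/xg-import-tools | O365import.py | urltoregex
-- ===== SOURCE A (Python) =====
-- def urltoregex(url):
--     # Convert wildcards and periods into regex elements. Assume '*.' means
--     # any subdomain, and '*' means any characters added to the given domain
--     regex = '^'
--     i = 0
--     wildcard = 0
--     for x in url:
--         if x == '*':
--             if i < (len(url) - 1) and url[i + 1] == '.':
--                 wildcard = 1
--             else:
--                 regex = regex + '[a-zA-Z0-9.-]*'
--         elif x == '.':
--             if wildcard == 1:
--                 regex = regex + '([a-zA-Z0-9.-]*\.)?'
--                 wildcard = 0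
--             else:
--                 regex = regex + '\.'
--         else:
--             regex = regex + x
--         i = i + 1
--
--     return regex
-- ===== SOURCE B (Python) =====
-- def urltoregex(url):
--     # Convert wildcards and periods into regex elements. Assume '*.' means
--     # any subdomain, and '*' means any characters added to the given domain.
--     # Token scan: consume '*.' / '*' / '.' / other per step, collect pieces, join once.
--     pieces = ['^']
--     i, n = 0, len(url)
--     while i < n:
--         if url.startswith('*.', i):
--             pieces.append('([a-zA-Z0-9.-]*\\.)?')
--             i += 2
--         elif url[i] == '*':
--             pieces.append('[a-zA-Z0-9.-]*')
--             i += 1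
--         elif url[i] == '.':
--             pieces.append('\\.')
--             i += 1
--         else:
--             pieces.append(url[i])
--             i += 1
--     return ''.join(pieces)
-- ===== Notes on version B (the rewrite author's own statement) =====
-- stated objective: alternative
-- what changed: Replaced A's per-character state machine (lookahead + 'wildcard' flag carried across iterations) by a flag-free token scan that consumes '*.', '*', '.' or a plain char per step, collects the replacement pieces in a list and joins them once.
import Mathlib
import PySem

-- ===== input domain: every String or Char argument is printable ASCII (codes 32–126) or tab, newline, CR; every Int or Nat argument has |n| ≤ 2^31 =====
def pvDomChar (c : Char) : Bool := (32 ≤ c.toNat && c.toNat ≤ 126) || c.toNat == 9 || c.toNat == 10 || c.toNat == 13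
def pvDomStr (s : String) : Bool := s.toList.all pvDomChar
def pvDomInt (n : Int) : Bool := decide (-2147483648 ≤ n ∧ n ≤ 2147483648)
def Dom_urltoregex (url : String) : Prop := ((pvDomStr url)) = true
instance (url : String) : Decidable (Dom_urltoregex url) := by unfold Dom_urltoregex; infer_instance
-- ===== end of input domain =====

-- B replaces A's per-character state machine (wildcard flag + repeated string append)
-- by a flag-free token scan ('*.' / '*' / '.' / other) whose pieces are joined once (objective: alternative).

-- ===== PORT A =====
-- A's loop: wildcard flag and growing regex string; the lookahead
-- 'i < len(url)-1 and url[i+1] == "."' is exactly 'rest.head? = some '.''.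
def urltoregexGo : List Char → String → Nat → String
  | [], regex, _ => regex
  | x :: rest, regex, wildcard =>
    if x = '*' then
      if rest.head? = some '.' then urltoregexGo rest regex 1
      else urltoregexGo rest (regex ++ "[a-zA-Z0-9.-]*") wildcard
    else if x = '.' then
      if wildcard = 1 then urltoregexGo rest (regex ++ "([a-zA-Z0-9.-]*\\.)?") 0
      else urltoregexGo rest (regex ++ "\\.") wildcard
    else urltoregexGo rest (regex ++ x.toString) wildcard

def urltoregex (url : String) : String := urltoregexGo url.toList "^" 0

-- ===== PORT B =====
-- B's token scan: each step consumes '*.' (two chars), '*', '.' or a plain char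
-- and emits one piece; the pieces (after the leading '^') are joined once.
def urltoregexAltGo : List Char → List String
  | [] => []
  | '*' :: '.' :: rest => "([a-zA-Z0-9.-]*\\.)?" :: urltoregexAltGo rest
  | '*' :: rest => "[a-zA-Z0-9.-]*" :: urltoregexAltGo rest
  | '.' :: rest => "\\." :: urltoregexAltGo rest
  | x :: rest => x.toString :: urltoregexAltGo rest

def urltoregex_alt (url : String) : String :=
  String.join ("^" :: urltoregexAltGo url.toList)

-- ===== PRECONDITION & SPEC =====
def Spec_urltoregex (url : String) (out : String) : Prop := out = urltoregex_alt url
instance (url : String) (out : String) : Decidable (Spec_urltoregex url out) := by unfold Spec_urltoregex; infer_instance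

-- ===== CLAIM (what is proved, stated in full; the proofs are below) =====
def Claim_equal_urltoregex : Prop := ∀ (url : String), Dom_urltoregex url → Spec_urltoregex url (urltoregex url)

-- ===== LEMMAS AND PROOFS =====

theorem join_cons (s : String) (L : List String) :
    String.join (s :: L) = s ++ String.join L := by
  have h : ∀ (L : List String) (a : String), L.foldl (· ++ ·) a = a ++ L.foldl (· ++ ·) "" := by
    intro L
    induction L with
    | nil => intro a; simp
    | cons x xs ih =>
      intro a
      simp only [List.foldl_cons]
      rw [ih (a ++ x), ih ("" ++ x)]
      simp [String.append_assoc]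
  simp only [String.join, List.foldl_cons]
  rw [h L ("" ++ s)]
  simp

theorem altGo_star (y : Char) (r : List Char) (hy : y ≠ '.') :
    urltoregexAltGo ('*' :: y :: r) = "[a-zA-Z0-9.-]*" :: urltoregexAltGo (y :: r) := by
  simp [urltoregexAltGo, hy]

theorem altGo_other (x : Char) (r : List Char) (hx : x ≠ '*') (_hd : x ≠ '.') :
    urltoregexAltGo (x :: r) = x.toString :: urltoregexAltGo r := by
  simp [urltoregexAltGo, hx]

theorem key (n : Nat) : ∀ (l : List Char), l.length ≤ n → ∀ (regex : String),
    urltoregexGo l regex 0 = regex ++ String.join (urltoregexAltGo l) := by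
  induction n with
  | zero =>
    intro l hl regex
    have : l = [] := List.length_eq_zero_iff.mp (Nat.le_zero.mp hl)
    subst this
    show regex = regex ++ String.join []
    simp [String.join]
  | succ n ih =>
    intro l hl regex
    cases l with
    | nil =>
      show regex = regex ++ String.join []
      simp [String.join]
    | cons x rest =>
      by_cases hx : x = '*'
      · subst hx
        cases rest with
        | nil =>
          show urltoregexGo ['*'] regex 0 = regex ++ String.join (urltoregexAltGo ['*'])
          rw [show urltoregexAltGo ['*'] = ["[a-zA-Z0-9.-]*"] from rfl, join_cons]
          simp [urltoregexGo, String.join]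
        | cons y rest2 =>
          by_cases hy : y = '.'
          · subst hy
            have h2 : rest2.length ≤ n := by simp at hl; omega
            calc urltoregexGo ('*' :: '.' :: rest2) regex 0
                = urltoregexGo ('.' :: rest2) regex 1 := by simp [urltoregexGo]
              _ = urltoregexGo rest2 (regex ++ "([a-zA-Z0-9.-]*\\.)?") 0 := by simp [urltoregexGo]
              _ = regex ++ "([a-zA-Z0-9.-]*\\.)?" ++ String.join (urltoregexAltGo rest2) := ih rest2 h2 _
              _ = regex ++ String.join (urltoregexAltGo ('*' :: '.' :: rest2)) := by
                  rw [show urltoregexAltGo ('*' :: '.' :: rest2)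
                      = "([a-zA-Z0-9.-]*\\.)?" :: urltoregexAltGo rest2 from rfl,
                    join_cons, String.append_assoc]
          · have h2 : (y :: rest2).length ≤ n := by simp at hl ⊢; omega
            rw [show urltoregexGo ('*' :: y :: rest2) regex 0
                = urltoregexGo (y :: rest2) (regex ++ "[a-zA-Z0-9.-]*") 0 by simp [urltoregexGo, hy]]
            rw [ih _ h2 _, altGo_star y rest2 hy, join_cons, String.append_assoc]
      · have h2 : rest.length ≤ n := by simp at hl; omega
        by_cases hd : x = '.'
        · subst hd
          rw [show urltoregexGo ('.' :: rest) regex 0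
              = urltoregexGo rest (regex ++ "\\.") 0 by simp [urltoregexGo]]
          rw [ih rest h2 _,
            show urltoregexAltGo ('.' :: rest) = "\\." :: urltoregexAltGo rest from rfl,
            join_cons, String.append_assoc]
        · rw [show urltoregexGo (x :: rest) regex 0
              = urltoregexGo rest (regex ++ x.toString) 0 by simp [urltoregexGo, hx, hd]]
          rw [ih rest h2 _, altGo_other x rest hx hd, join_cons, String.append_assoc]

-- ===== VERDICT (by name: the statement is the Claim_ definition above) =====
theorem urltoregex_spec : Claim_equal_urltoregex := by
  intro url _
  unfold Spec_urltoregex urltoregex urltoregex_alt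
  rw [key url.toList.length url.toList le_rfl "^", join_cons]
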